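-- pv_equiv track=rewrite | github.com/kmathl96/Algorithm | programmers/level2/17686.py | solution
-- ===== SOURCE A (Python) =====
-- def solution(files):
--     filenames = [] # 각 파일 이름을 HEAD, NUMBER, TAIL로 나눠서 저장할 리스트
--     for filename in files:
--         for i in range(len(filename)):
--             s1 = ord(filename[i])
--             if 48 <= s1 <= 57: # 숫자인 경우
--                 head = filename[:i] # 첫 문자부터 그전 문자까지 HEAD
--                 number = filename[i:i+5] # 5글자는 NUMBER로 저장
--                 tail = filename[i+5:] # 그 뒤의 문자열은 TAIL
--                 for j in range(len(number)): # NUMBER 안에 문자가 있는지 찾기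
--                     s2 = ord(number[j])
--                     if s2 < 48 or s2 > 57: # 숫자가 아닌 경우 NUMBER, TAIL 변경 후 종료
--                         number = filename[i:i+j]
--                         tail = filename[i+j:]
--                         break
--                 filenames.append([head,number,tail])
--                 break
--     # 1. HEAD 기준으로 정렬 - 대소문자 구분을 하지 않으므로 소문자로 바꿔서 처리
--     # 2. NUMBER 기준으로 정렬 - 문자열로 저장돼있으므로 숫자로 바꿔서 처리
--     filenames.sort(key=lambda x: (x[0].lower(),int(x[1])))
--     return ["".join(map(str,filename)) for filename in filenames] # HEAD, NUMBER, TAIL로 나뉘어있는 각 파일을 다시 문자열로 만들어서 반환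
-- ===== SOURCE B (Python) =====
-- def solution(files):
--     # Group files by lowercased HEAD in a dict (parsed by a per-character
--     # state machine, no slicing); emit groups in sorted-head order, each
--     # group stably sorted by its number. Stability of the grouped traversal
--     # reproduces A's single stable sort by the composite key.
--     groups = {}
--     for f in files:
--         head = []
--         digits = []
--         for ch in f:
--             if '0' <= ch <= '9':
--                 if len(digits) == 5:
--                     break
--                 digits.append(ch)
--             elif digits:
--                 break
--             else:
--                 head.append(ch.lower())
--         if not digits:
--             continue
--         h = ''.join(head)
--         groups[h] = groups.get(h, []) + [(int(''.join(digits)), f)]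
--     out = []
--     for h in sorted(groups):
--         for _, f in sorted(groups[h], key=lambda t: t[0]):
--             out.append(f)
--     return out
-- ===== Notes on version B (the rewrite author's own statement) =====
-- stated objective: alternative
-- what changed: B replaces A's index-scan-and-slice parsing and single stable sort by a composite (head.lower(), int(number)) key with a per-character state machine that accumulates the lowered head and up to five digit characters, a dict grouping files by lowered head, and a two-level emission (heads in sorted order, each bucket stably sorted by number alone), which yields the same order by stability.
import Mathlib
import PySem

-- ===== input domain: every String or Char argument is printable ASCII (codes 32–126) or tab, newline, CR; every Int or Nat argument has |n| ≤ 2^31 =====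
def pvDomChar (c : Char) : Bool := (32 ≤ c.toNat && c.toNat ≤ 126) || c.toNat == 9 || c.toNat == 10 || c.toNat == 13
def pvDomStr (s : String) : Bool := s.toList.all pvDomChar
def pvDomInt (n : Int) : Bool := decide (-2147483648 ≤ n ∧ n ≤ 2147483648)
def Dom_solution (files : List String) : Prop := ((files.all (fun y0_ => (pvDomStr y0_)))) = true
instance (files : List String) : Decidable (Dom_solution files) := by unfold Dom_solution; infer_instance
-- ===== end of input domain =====

-- B groups files by lowered head in a dict (parsed by a per-char state machine) and emits
-- sorted heads with each bucket stably sorted by number, instead of A's slice-parse plus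
-- one stable sort by a composite key; same return value, alternative algorithm.

-- ===== PORT A =====
-- '48 <= ord(c) <= 57' — the digit test both Pythons spell out via character bounds
def pvDigit (c : Char) : Bool := 48 ≤ c.toNat && c.toNat ≤ 57

-- the shape shared by A's two index loops ('for i in range(len(s)): if p(s[i]): … break'):
-- first index (counting from i) whose character satisfies p, none if the loop falls through
def pvA_scan (p : Char → Bool) : List Char → Nat → Option Nat
  | [], _ => none
  | c :: rest, i => if p c then some i else pvA_scan p rest (i + 1)

-- the body of A's outer for-loop: split one filename into [head, number, tail]
def pvA_parse (cs : List Char) : Option (List Char × List Char × List Char) :=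
  match pvA_scan pvDigit cs 0 with
  | none => none
  | some i =>
      let head := PySem.List.slice cs none (some (i : Int))        -- filename[:i]
      let number := PySem.List.slice cs (some (i : Int)) (some ((i : Int) + 5))  -- filename[i:i+5]
      let tail := PySem.List.slice cs (some ((i : Int) + 5)) none  -- filename[i+5:]
      match pvA_scan (fun c => !pvDigit c) number 0 with           -- inner j-loop over number
      | none => some (head, number, tail)
      | some j => some (head,
          PySem.List.slice cs (some (i : Int)) (some ((i : Int) + (j : Int))),  -- filename[i:i+j]
          PySem.List.slice cs (some ((i : Int) + (j : Int))) none)              -- filename[i+j:]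

def solution (files : List String) : List String :=
  let filenames := files.foldl (fun acc f =>
      match pvA_parse f.toList with
      | none => acc
      | some t => acc ++ [t]) []
  let sorted := PySem.List.sorted2 filenames
      (fun x => PySem.Str.lower (String.ofList x.1))            -- x[0].lower()
      (fun x => (PySem.Int.ofChars? x.2.1).getD 0)          -- int(x[1]); x[1] is always a nonempty digit string, so ofChars? is always some
      false
  sorted.map (fun x => PySem.Str.join "" [String.ofList x.1, String.ofList x.2.1, String.ofList x.2.2])

-- ===== PORT B =====
-- B's inner character loop: accumulate lowered head chars and up to five digit chars,
-- stopping (Python 'break') after the digit run or at the 5-digit cap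
def pvB_parse : List Char → List Char → List Char → (List Char × List Char)
  | [], head, digits => (head, digits)
  | c :: rest, head, digits =>
      if pvDigit c then
        if digits.length = 5 then (head, digits)
        else pvB_parse rest head (digits ++ [c])
      else if digits.isEmpty then
        pvB_parse rest (head ++ [PySem.Chars.lowerChar c]) digits
      else (head, digits)

def solution_alt (files : List String) : List String :=
  let groups := files.foldl (fun d f =>
      let hd := pvB_parse f.toList [] []
      if hd.2 = [] then d
      else d.modify (String.ofList hd.1) []                        -- groups[h] = groups.get(h, []) + [(int(..), f)]
          (fun v => v ++ [((PySem.Int.ofChars? hd.2).getD 0, f)])) PySem.Dict.empty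
  (PySem.List.sorted groups.keys (fun x => x)).foldl (fun out h =>
      (PySem.List.sorted (groups.getD h []) (fun t => t.1)).foldl
        (fun out t => out ++ [t.2]) out) []

-- ===== PRECONDITION & SPEC =====
def Spec_solution (files : List String) (out : List String) : Prop := out = solution_alt files
instance (files : List String) (out : List String) : Decidable (Spec_solution files out) := by unfold Spec_solution; infer_instance

-- ===== CLAIM (what is proved, stated in full; the proofs are below) =====
def Claim_equal_solution : Prop := ∀ (files : List String), Dom_solution files → Spec_solution files (solution files)

-- ===== LEMMAS AND PROOFS =====

-- the sort keys both programs use, on decorated triples (lowered head, number, original file)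
def pvLex (a b : String × Int × String) : Bool :=
  decide (a.1 < b.1) || (!decide (b.1 < a.1) && decide (a.2.1 < b.2.1))
def pvK2 (a b : String × Int × String) : Bool := decide (a.2.1 < b.2.1)

def pvG (x : List Char × List Char × List Char) : String × Int × String :=
  (PySem.Str.lower (String.ofList x.1),
   ((PySem.Int.ofChars? x.2.1).getD 0, String.ofList (x.1 ++ x.2.1 ++ x.2.2)))

theorem pv_scan_eq (p : Char → Bool) (cs : List Char) (i : Nat) :
    pvA_scan p cs i = if cs.dropWhile (fun c => !p c) = [] then none
      else some (i + (cs.takeWhile (fun c => !p c)).length) := by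
  induction cs generalizing i with
  | nil => rfl
  | cons c rest ih =>
    by_cases h : p c = true <;>
      simp [pvA_scan, h, ih] <;> (split <;> simp) <;> omega

theorem pv_takeTW (r : List Char) :
    (r.takeWhile pvDigit).take 5 = r.take (min 5 (r.takeWhile pvDigit).length) := by
  have h : r.take (r.takeWhile pvDigit).length = r.takeWhile pvDigit :=
    (List.prefix_iff_eq_take.mp (List.takeWhile_prefix pvDigit)).symm
  conv_rhs => rw [← List.take_take]
  rw [h]

theorem pv_parseA_eq (cs : List Char) :
    pvA_parse cs =
      if (cs.dropWhile (fun c => !pvDigit c)) = [] then none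
      else some (cs.takeWhile (fun c => !pvDigit c),
        (cs.dropWhile (fun c => !pvDigit c)).take
          (min 5 ((cs.dropWhile (fun c => !pvDigit c)).takeWhile pvDigit).length),
        (cs.dropWhile (fun c => !pvDigit c)).drop
          (min 5 ((cs.dropWhile (fun c => !pvDigit c)).takeWhile pvDigit).length)) := by
  unfold pvA_parse
  rw [pv_scan_eq]
  set tw := cs.takeWhile (fun c => !pvDigit c) with htw
  set r := cs.dropWhile (fun c => !pvDigit c) with hr
  by_cases h : r = []
  · simp [h]
  · simp only [h, if_false]
    have hcat : tw ++ r = cs := List.takeWhile_append_dropWhile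
    have hdrop : cs.drop tw.length = r := by rw [← hcat]; exact List.drop_left
    have htake : cs.take tw.length = tw := by rw [← hcat]; exact List.take_left
    have h5 : ((0 + tw.length : Nat) : Int) + 5 = (((0 + tw.length) + 5 : Nat) : Int) := by push_cast; ring
    rw [pv_scan_eq]
    simp only [Bool.not_not]
    rw [PySem.List.slice_to_natCast, h5, PySem.List.slice_natCast, PySem.List.slice_from_natCast]
    simp only [Nat.zero_add, Nat.add_sub_cancel_left] at *
    have hnum0 : List.take 5 (List.drop tw.length cs) = r.take 5 := by rw [hdrop]
    have hTW5 : (r.take 5).takeWhile pvDigit = (r.takeWhile pvDigit).take 5 :=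
      (List.take_takeWhile).symm
    by_cases hin : (r.take 5).dropWhile pvDigit = []
    · -- all of the first five characters are digits
      simp only [hnum0, hin, if_pos]
      have hall : (r.take 5).takeWhile pvDigit = r.take 5 := by
        have := List.takeWhile_append_dropWhile (p := pvDigit) (l := r.take 5)
        rw [hin, List.append_nil] at this; exact this
      have hlen : min 5 (r.takeWhile pvDigit).length = min 5 r.length := by
        have h1 := congrArg List.length (hTW5 ▸ hall)
        simp [List.length_take] at h1
        omega
      simp only [Option.some.injEq, Prod.mk.injEq]
      refine ⟨htake, ?_, ?_⟩
      · rw [pv_takeTW] at hTW5; rw [hall] at hTW5; exact hTW5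
      · rw [hlen, ← hcat, List.drop_length_add_append]
        by_cases hle : r.length ≤ 5
        · rw [List.drop_eq_nil_of_le (by omega), List.drop_eq_nil_of_le (by omega)]
        · have h55 : min 5 r.length = 5 := by omega
          rw [h55]
    · simp only [hnum0, hin, if_false]
      have hj : ((r.take 5).takeWhile pvDigit).length = min 5 (r.takeWhile pvDigit).length := by
        rw [hTW5]; simp [List.length_take]
      set m := min 5 (r.takeWhile pvDigit).length with hm
      have hcast : ((tw.length : Nat) : Int) + ((((r.take 5).takeWhile pvDigit).length : Nat) : Int)
          = ((tw.length + ((r.take 5).takeWhile pvDigit).length : Nat) : Int) := by push_cast; ring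
      rw [hcast, PySem.List.slice_natCast, PySem.List.slice_from_natCast]
      simp only [Nat.add_sub_cancel_left]
      simp only [Option.some.injEq, Prod.mk.injEq]
      refine ⟨htake, ?_, ?_⟩
      · rw [hdrop, hj]
      · rw [← hcat, List.drop_length_add_append, hj]

theorem pv_foldA (files : List String) (acc : List (List Char × List Char × List Char)) :
    files.foldl (fun acc f =>
      match pvA_parse f.toList with
      | none => acc
      | some t => acc ++ [t]) acc
    = acc ++ files.filterMap (fun f => pvA_parse f.toList) := by
  induction files generalizing acc with
  | nil => simp
  | cons f fs ih =>
    simp only [List.foldl_cons, List.filterMap_cons]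
    cases h : pvA_parse f.toList <;> simp [ih]

-- B's digit phase: once digits is a nonempty run, at most the first 5-|digits| further digits are taken
theorem pv_parseB_digits (cs : List Char) (head ds : List Char) (h1 : ds ≠ []) (h2 : ds.length ≤ 5) :
    pvB_parse cs head ds = (head, ds ++ (cs.takeWhile pvDigit).take (5 - ds.length)) := by
  induction cs generalizing ds with
  | nil => simp [pvB_parse]
  | cons c rest ih =>
    by_cases hc : pvDigit c = true
    · by_cases h5 : ds.length = 5
      · simp [pvB_parse, hc, h5]
      · have hlen : (ds ++ [c]).length ≤ 5 := by simp; omega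
        have h55 : 5 - ds.length = (5 - (ds ++ [c]).length) + 1 := by simp; omega
        simp only [pvB_parse, hc, if_true, h5, if_false, ih (ds ++ [c]) (by simp) hlen,
          List.takeWhile_cons, h55, List.take_succ_cons, List.append_assoc, List.cons_append,
          List.nil_append]
    · have he : ds.isEmpty = false := by simpa using h1
      simp [pvB_parse, hc, he, List.takeWhile_cons_of_neg]
theorem pv_parseB_eq (cs head : List Char) :
    pvB_parse cs head []
      = (head ++ (cs.takeWhile (fun c => !pvDigit c)).map PySem.Chars.lowerChar,
         ((cs.dropWhile (fun c => !pvDigit c)).takeWhile pvDigit).take 5) := by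
  induction cs generalizing head with
  | nil => simp [pvB_parse]
  | cons c rest ih =>
    by_cases hc : pvDigit c = true
    · rw [show pvB_parse (c :: rest) head [] = pvB_parse rest head [c] by simp [pvB_parse, hc]]
      rw [pv_parseB_digits rest head [c] (by simp) (by simp)]
      simp [hc]
    · rw [show pvB_parse (c :: rest) head []
          = pvB_parse rest (head ++ [PySem.Chars.lowerChar c]) [] by simp [pvB_parse, hc]]
      rw [ih]
      simp [hc]

theorem pv_digits_ne (cs : List Char) (h : cs.dropWhile (fun c => !pvDigit c) ≠ []) :
    ((cs.dropWhile (fun c => !pvDigit c)).takeWhile pvDigit).take 5 ≠ [] := by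
  induction cs with
  | nil => simp at h
  | cons c rest ih =>
    by_cases hc : pvDigit c = true
    · simp [hc]
    · simp only [List.dropWhile_cons, hc] at h ⊢
      simp only [Bool.not_false, if_true] at h ⊢
      exact ih h

theorem pv_lower_ofList (tw : List Char) :
    String.ofList (tw.map PySem.Chars.lowerChar) = PySem.Str.lower (String.ofList tw) := by
  have h : (PySem.Str.lower (String.ofList tw)).toList = tw.map PySem.Chars.lowerChar := by
    simp [PySem.Chars.lower]
  rw [← h, String.ofList_toList]

-- B's per-file parse produces exactly pvG of A's per-file parse (or both skip the file)
theorem pv_entryB (f : String) :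
    (if (pvB_parse f.toList [] []).2 = [] then (none : Option (String × Int × String))
     else some (String.ofList (pvB_parse f.toList [] []).1,
        ((PySem.Int.ofChars? (pvB_parse f.toList [] []).2).getD 0, f)))
    = (pvA_parse f.toList).map pvG := by
  rw [pv_parseB_eq, pv_parseA_eq]
  by_cases h : (f.toList.dropWhile (fun c => !pvDigit c)) = []
  · simp [h]
  · have hne := pv_digits_ne f.toList h
    simp only [h, if_false, hne, Option.map_some, pvG]
    have hcat : (f.toList.takeWhile (fun c => !pvDigit c)) ++ (f.toList.dropWhile (fun c => !pvDigit c)) = f.toList :=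
      List.takeWhile_append_dropWhile
    have hjoin : (f.toList.takeWhile (fun c => !pvDigit c)) ++
        ((f.toList.dropWhile (fun c => !pvDigit c)).take
          (min 5 ((f.toList.dropWhile (fun c => !pvDigit c)).takeWhile pvDigit).length)) ++
        ((f.toList.dropWhile (fun c => !pvDigit c)).drop
          (min 5 ((f.toList.dropWhile (fun c => !pvDigit c)).takeWhile pvDigit).length)) = f.toList := by
      rw [List.append_assoc, List.take_append_drop, hcat]
    simp only [List.nil_append, Option.some.injEq, Prod.mk.injEq]
    refine ⟨pv_lower_ofList _, ?_, ?_⟩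
    · rw [pv_takeTW]
    · rw [hjoin, String.ofList_toList]

-- B's dict-building loop over files, re-indexed by the decorated triples it inserts
theorem pv_foldB (files : List String) (d : PySem.Dict String (List (Int × String))) :
    files.foldl (fun d f =>
      let hd := pvB_parse f.toList [] []
      if hd.2 = [] then d
      else d.modify (String.ofList hd.1) []
          (fun v => v ++ [((PySem.Int.ofChars? hd.2).getD 0, f)])) d
    = (files.filterMap (fun f => (pvA_parse f.toList).map pvG)).foldl
        (fun d t => d.modify t.1 [] (fun v => v ++ [t.2])) d := by
  induction files generalizing d with
  | nil => rfl
  | cons f fs ih =>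
    simp only [List.foldl_cons, List.filterMap_cons]
    have h := pv_entryB f
    by_cases hc : (pvB_parse f.toList [] []).2 = []
    · rw [if_pos hc] at h
      simp [hc, ← h, ih]
    · rw [if_neg hc] at h
      simp [hc, ← h, ih]

theorem pv_insertBy_map {α β : Type} (g : α → β) (p : α → α → Bool) (q : β → β → Bool)
    (h : ∀ a b, q (g a) (g b) = p a b) (ys : List α) (x : α) :
    PySem.List.insertBy q (g x) (ys.map g) = (PySem.List.insertBy p x ys).map g := by
  induction ys with
  | nil => rfl
  | cons y ys ih =>
    simp only [List.map_cons, PySem.List.insertBy]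
    rw [h]
    split <;> simp_all

theorem pv_foldl_insertBy_map {α β : Type} (g : α → β) (p : α → α → Bool) (q : β → β → Bool)
    (h : ∀ a b, q (g a) (g b) = p a b) (xs : List α) (acc : List α) :
    List.foldl (fun acc x => PySem.List.insertBy q x acc) (acc.map g) (xs.map g)
    = (List.foldl (fun acc x => PySem.List.insertBy p x acc) acc xs).map g := by
  induction xs generalizing acc with
  | nil => rfl
  | cons x xs ih =>
    simp only [List.map_cons, List.foldl_cons]
    rw [pv_insertBy_map g p q h, ih]

theorem pv_join3 (a b c : List Char) :
    PySem.Str.join "" [String.ofList a, String.ofList b, String.ofList c]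
    = String.ofList (a ++ b ++ c) := by
  have h := PySem.Str.toList_join "" [String.ofList a, String.ofList b, String.ofList c]
  have h2 : (PySem.Str.join "" [String.ofList a, String.ofList b, String.ofList c]).toList
      = a ++ b ++ c := by
    rw [h]; simp [PySem.Chars.join, List.intercalate]
  rw [← String.ofList_toList (s := PySem.Str.join "" [String.ofList a, String.ofList b, String.ofList c]), h2]

-- evaluation facts for the composite key
theorem pv_lex_of_lt (x y : String × Int × String) (h : x.1 < y.1) : pvLex x y = true := by
  simp [pvLex, h]
theorem pv_lex_of_gt (x y : String × Int × String) (h : y.1 < x.1) : pvLex x y = false := by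
  simp [pvLex, h, lt_asymm h]
theorem pv_lex_of_eq (x y : String × Int × String) (h : x.1 = y.1) : pvLex x y = pvK2 x y := by
  simp [pvLex, pvK2, h]

theorem pv_flatMap_congr {α β : Type} (l : List α) (f g : α → List β)
    (h : ∀ a ∈ l, f a = g a) : l.flatMap f = l.flatMap g := by
  simp only [List.flatMap_def]
  exact congrArg List.flatten (List.map_congr_left h)

theorem pv_insertBy_append_false {α : Type} (p : α → α → Bool) (x : α) (as bs : List α)
    (h : ∀ y ∈ as, p x y = false) :
    PySem.List.insertBy p x (as ++ bs) = as ++ PySem.List.insertBy p x bs := by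
  induction as with
  | nil => rfl
  | cons a as ih =>
    have ha : p x a = false := h a (by simp)
    simp only [List.cons_append, PySem.List.insertBy, ha, Bool.false_eq_true, if_false]
    rw [ih (fun y hy => h y (by simp [hy]))]

theorem pv_insertBy_append_any {α : Type} (p : α → α → Bool) (x : α) (as bs : List α)
    (h : as.any (p x) = true) :
    PySem.List.insertBy p x (as ++ bs) = PySem.List.insertBy p x as ++ bs := by
  induction as with
  | nil => simp at h
  | cons a as ih =>
    by_cases ha : p x a = true
    · simp [PySem.List.insertBy, ha]
    · simp only [List.any_cons, ha, Bool.false_or] at h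
      simp only [List.cons_append, PySem.List.insertBy, ha, Bool.false_eq_true, if_false, ih h]

theorem pv_insertBy_congr {α : Type} (p q : α → α → Bool) (x : α) (as : List α)
    (h : ∀ y ∈ as, p x y = q x y) :
    PySem.List.insertBy p x as = PySem.List.insertBy q x as := by
  induction as with
  | nil => rfl
  | cons a as ih =>
    have ha := h a (by simp)
    simp only [PySem.List.insertBy, ha]
    split
    · rfl
    · rw [ih (fun y hy => h y (by simp [hy]))]

-- inserting x into the grouped concatenation when its head already owns a block:
-- x drops into its own block, by its number key alone
theorem pv_ins_mem (x : String × Int × String) (hs : List String)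
    (g : String → List (String × Int × String))
    (hp : hs.Pairwise (· < ·))
    (hg : ∀ h ∈ hs, ∀ y ∈ g h, y.1 = h)
    (hne : ∀ h ∈ hs, g h ≠ [])
    (hmem : x.1 ∈ hs) :
    PySem.List.insertBy pvLex x (hs.flatMap g)
      = hs.flatMap (fun h => if h = x.1 then PySem.List.insertBy pvK2 x (g h) else g h) := by
  induction hs with
  | nil => cases hmem
  | cons h t ih =>
    have hpc := List.pairwise_cons.mp hp
    rw [List.flatMap_cons, List.flatMap_cons]
    rcases eq_or_ne h x.1 with he | hne1
    · subst he
      have hagree : ∀ y ∈ g x.1, pvLex x y = pvK2 x y := fun y hy =>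
        pv_lex_of_eq x y ((hg x.1 (by simp) y hy).symm)
      have htcong : t.flatMap (fun h' => if h' = x.1 then PySem.List.insertBy pvK2 x (g h') else g h')
          = t.flatMap g := by
        refine pv_flatMap_congr _ _ _ (fun h' hh' => ?_)
        rw [if_neg (ne_of_gt (hpc.1 h' hh'))]
      rw [if_pos rfl, htcong]
      by_cases hany : (g x.1).any (pvLex x) = true
      · rw [pv_insertBy_append_any _ _ _ _ hany, pv_insertBy_congr _ _ _ _ hagree]
      · have hanyf : (g x.1).any (pvLex x) = false := by simpa using hany
        have hfalse : ∀ y ∈ g x.1, pvLex x y = false := by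
          intro y hy
          have h' := (List.any_eq_false.mp hanyf) y hy
          simpa using h'
        have hkfalse : ∀ y ∈ g x.1, pvK2 x y = false := fun y hy => by
          rw [← hagree y hy]; exact hfalse y hy
        rw [pv_insertBy_append_false _ _ _ _ hfalse,
            PySem.List.insertBy_of_forall_not_before _ _ _ hkfalse]
        cases t with
        | nil => simp [PySem.List.insertBy]
        | cons h' t' =>
          rw [List.flatMap_cons]
          obtain ⟨b, bs, hb⟩ : ∃ b bs, g h' = b :: bs := by
            cases hgh : g h' with
            | nil => exact absurd hgh (hne h' (by simp))
            | cons b bs => exact ⟨b, bs, rfl⟩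
          have hblt : pvLex x b = true := by
            refine pv_lex_of_lt x b ?_
            rw [hg h' (by simp) b (by simp [hb])]
            exact hpc.1 h' (by simp)
          rw [hb]
          simp only [List.cons_append, PySem.List.insertBy, hblt, if_true]
          simp
    · have hx1t : x.1 ∈ t := by
        rcases List.mem_cons.mp hmem with h1 | h1
        · exact absurd h1.symm hne1
        · exact h1
      have hfalse : ∀ y ∈ g h, pvLex x y = false := fun y hy =>
        pv_lex_of_gt x y (by rw [hg h (by simp) y hy]; exact hpc.1 x.1 hx1t)
      rw [pv_insertBy_append_false _ _ _ _ hfalse,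
          ih hpc.2 (fun h' hh' => hg h' (by simp [hh'])) (fun h' hh' => hne h' (by simp [hh'])) hx1t,
          if_neg hne1]

-- inserting x into the grouped concatenation when its head is new:
-- a fresh singleton block appears exactly where the head sorts
theorem pv_ins_notmem (x : String × Int × String) (hs : List String)
    (g : String → List (String × Int × String))
    (hp : hs.Pairwise (· < ·))
    (hg : ∀ h ∈ hs, ∀ y ∈ g h, y.1 = h)
    (hne : ∀ h ∈ hs, g h ≠ [])
    (hmem : x.1 ∉ hs) :
    PySem.List.insertBy pvLex x (hs.flatMap g)
      = (PySem.List.insertBy (fun a b => decide (a < b)) x.1 hs).flatMap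
          (fun h => if h = x.1 then [x] else g h) := by
  induction hs with
  | nil => simp [PySem.List.insertBy]
  | cons h t ih =>
    have hpc := List.pairwise_cons.mp hp
    have hne1 : h ≠ x.1 := fun he => hmem (by simp [he])
    rcases lt_trichotomy x.1 h with hlt | he | hgt
    · obtain ⟨b, bs, hb⟩ : ∃ b bs, g h = b :: bs := by
        cases hgh : g h with
        | nil => exact absurd hgh (hne h (by simp))
        | cons b bs => exact ⟨b, bs, rfl⟩
      have hblt : pvLex x b = true := by
        refine pv_lex_of_lt x b ?_
        rw [hg h (by simp) b (by simp [hb])]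
        exact hlt
      rw [List.flatMap_cons, hb]
      simp only [List.cons_append, PySem.List.insertBy, hblt, if_true,
        decide_eq_true_eq, hlt]
      rw [List.flatMap_cons, if_pos rfl, List.flatMap_cons, if_neg hne1, hb]
      have : t.flatMap (fun h' => if h' = x.1 then [x] else g h') = t.flatMap g := by
        refine pv_flatMap_congr _ _ _ (fun h' hh' => ?_)
        rw [if_neg (fun he => (by rw [← he] at hlt; exact absurd (hpc.1 h' hh') (lt_asymm hlt)))]
      simp [this]
    · exact absurd he.symm hne1
    · have hfalse : ∀ y ∈ g h, pvLex x y = false := fun y hy =>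
        pv_lex_of_gt x y (by rw [hg h (by simp) y hy]; exact hgt)
      have hmemt : x.1 ∉ t := fun ht => hmem (by simp [ht])
      rw [List.flatMap_cons, pv_insertBy_append_false _ _ _ _ hfalse,
          ih hpc.2 (fun h' hh' => hg h' (by simp [hh'])) (fun h' hh' => hne h' (by simp [hh'])) hmemt]
      have hnotlt : decide (x.1 < h) = false := by simpa using lt_asymm hgt
      simp only [PySem.List.insertBy, hnotlt, Bool.false_eq_true, if_false]
      rw [List.flatMap_cons, if_neg hne1]

-- the heart of the equivalence: for any decorated list, emitting sorted heads with each
-- bucket sorted by number equals the single stable insertion sort by the composite key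
theorem pv_group (L : List (String × Int × String)) :
    (PySem.List.sorted (PySem.Set.ofList (L.map (fun t => t.1))) (fun x => x)).flatMap
        (fun h => PySem.List.sorted (L.filter (fun t => t.1 == h)) (fun t => t.2.1))
      = L.foldl (fun acc x => PySem.List.insertBy pvLex x acc) [] := by
  induction L using List.reverseRecOn with
  | nil => rfl
  | append_singleton L x ih =>
    rw [List.foldl_append, List.foldl_cons, List.foldl_nil, ← ih]
    have hheads : PySem.Set.ofList ((L ++ [x]).map (fun t => t.1))
        = PySem.Set.add (PySem.Set.ofList (L.map (fun t => t.1))) x.1 := by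
      rw [List.map_append]
      simp [PySem.Set.ofList_eq_foldl, List.foldl_append]
    have hfilter : ∀ h : String, (L ++ [x]).filter (fun t => t.1 == h)
        = L.filter (fun t => t.1 == h) ++ if x.1 == h then [x] else [] := by
      intro h
      rw [List.filter_append]
      congr 1
      by_cases hbe : x.1 == h <;> simp [hbe]
    set S := PySem.Set.ofList (L.map (fun t => t.1)) with hS
    set hs := PySem.List.sorted S (fun x => x) with hhs
    have hp : hs.Pairwise (· < ·) := PySem.List.sorted_ofList_pairwise_lt _
    have hg : ∀ h ∈ hs, ∀ y ∈ PySem.List.sorted (L.filter (fun t => t.1 == h)) (fun t => t.2.1),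
        y.1 = h := by
      intro h _ y hy
      have := List.mem_filter.mp ((PySem.List.mem_sorted _ _ _ _).mp hy)
      exact eq_of_beq this.2
    have hne : ∀ h ∈ hs, PySem.List.sorted (L.filter (fun t => t.1 == h)) (fun t => t.2.1) ≠ [] := by
      intro h hh
      have hhS : h ∈ S := (PySem.List.mem_sorted _ _ _ _).mp hh
      have : h ∈ L.map (fun t => t.1) := (PySem.Set.mem_ofList _ _).mp hhS
      obtain ⟨t, ht, rfl⟩ := List.mem_map.mp this
      rw [Ne, PySem.List.sorted_eq_nil_iff, List.filter_eq_nil_iff]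
      push Not
      exact ⟨t, ht, by simp⟩
    by_cases hx : x.1 ∈ S
    · have hadd : PySem.Set.add S x.1 = S := by
        simp [PySem.Set.add, PySem.Set.contains, hx]
      rw [hheads, hadd, ← hhs]
      have hcong : hs.flatMap (fun h => PySem.List.sorted ((L ++ [x]).filter (fun t => t.1 == h))
            (fun t => t.2.1))
          = hs.flatMap (fun h => if h = x.1
              then PySem.List.insertBy pvK2 x
                (PySem.List.sorted (L.filter (fun t => t.1 == h)) (fun t => t.2.1))
              else PySem.List.sorted (L.filter (fun t => t.1 == h)) (fun t => t.2.1)) := by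
        refine pv_flatMap_congr _ _ _ (fun h _ => ?_)
        rw [hfilter h]
        by_cases he : h = x.1
        · subst he
          simp only [beq_self_eq_true, if_true]
          rw [PySem.List.sorted_eq_foldl_insertBy, PySem.List.sorted_eq_foldl_insertBy,
            List.foldl_append, List.foldl_cons, List.foldl_nil]
          rfl
        · rw [if_neg (fun hbe => he (eq_of_beq hbe).symm), List.append_nil, if_neg he]
      rw [hcong, ← pv_ins_mem x hs _ hp hg hne ((PySem.List.mem_sorted _ _ _ _).mpr hx)]
    · have hadd : PySem.Set.add S x.1 = S ++ [x.1] := by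
        simp [PySem.Set.add, PySem.Set.contains, hx]
      have hLfilter : L.filter (fun t => t.1 == x.1) = [] := by
        rw [List.filter_eq_nil_iff]
        intro t ht hbe
        exact hx ((PySem.Set.mem_ofList _ _).mpr (List.mem_map.mpr ⟨t, ht, eq_of_beq hbe⟩))
      rw [hheads, hadd]
      have hsorted : PySem.List.sorted (S ++ [x.1]) (fun x => x)
          = PySem.List.insertBy (fun a b => decide (a < b)) x.1 hs := by
        rw [hhs, PySem.List.sorted_eq_foldl_insertBy, PySem.List.sorted_eq_foldl_insertBy,
          List.foldl_append, List.foldl_cons, List.foldl_nil]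
      rw [hsorted]
      have hmem' : x.1 ∉ hs := fun hin => hx ((PySem.List.mem_sorted _ _ _ _).mp hin)
      have hcong : (PySem.List.insertBy (fun a b => decide (a < b)) x.1 hs).flatMap
            (fun h => PySem.List.sorted ((L ++ [x]).filter (fun t => t.1 == h)) (fun t => t.2.1))
          = (PySem.List.insertBy (fun a b => decide (a < b)) x.1 hs).flatMap
            (fun h => if h = x.1 then [x]
              else PySem.List.sorted (L.filter (fun t => t.1 == h)) (fun t => t.2.1)) := by
        refine pv_flatMap_congr _ _ _ (fun h hh => ?_)
        rw [hfilter h]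
        by_cases he : h = x.1
        · subst he
          rw [if_pos rfl, hLfilter]
          simp [PySem.List.sorted, PySem.List.insertBy]
        · rw [if_neg (fun hbe => he (eq_of_beq hbe).symm), List.append_nil, if_neg he]
      rw [hcong, ← pv_ins_notmem x hs _ hp hg hne hmem']

-- sorting the value pairs of a bucket by their number is the projection of sorting the triples
theorem pv_sorted_snd (X : List (String × Int × String)) :
    PySem.List.sorted (X.map (fun t => t.2)) (fun t => t.1)
      = (PySem.List.sorted X (fun t => t.2.1)).map (fun t => t.2) := by
  rw [PySem.List.sorted_eq_foldl_insertBy, PySem.List.sorted_eq_foldl_insertBy]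
  have := pv_foldl_insertBy_map (fun t : String × Int × String => t.2)
      (fun a b => decide (a.2.1 < b.2.1)) (fun a b => decide (a.1 < b.1))
      (fun a b => rfl) X []
  simpa using this

-- ===== VERDICT (by name: the statement is the Claim_ definition above) =====
theorem solution_spec : Claim_equal_solution := by
  intro files _
  unfold Spec_solution
  show solution files = solution_alt files
  simp only [solution, solution_alt]
  rw [pv_foldA, pv_foldB, List.nil_append]
  set raw := files.filterMap (fun f => pvA_parse f.toList) with hraw
  set K := files.filterMap (fun f => (pvA_parse f.toList).map pvG) with hK
  set D := K.foldl (fun d t => d.modify t.1 [] (fun v => v ++ [t.2])) PySem.Dict.empty with hD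
  have hKraw : K = raw.map pvG := by rw [hK, hraw, List.map_filterMap]
  have hkeys : D.keys = PySem.Set.ofList (K.map (fun t => t.1)) := by
    rw [hD, PySem.Dict.keys_foldl_modify_key K (fun t => t.1) [] (fun _ t v => v ++ [t.2])]
    simp [PySem.Dict.keys_empty, PySem.Set.update, PySem.Set.ofList_eq_foldl]
  have hgetD : ∀ h, D.getD h [] = (K.filter (fun t => t.1 == h)).map (fun t => t.2) := by
    intro h
    rw [hD, PySem.Dict.getD_foldl_modify_append]
    simp
  have hinner : ∀ (h : String) (out : List String),
      (PySem.List.sorted (D.getD h []) (fun t => t.1)).foldl (fun out t => out ++ [t.2]) out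
      = out ++ (PySem.List.sorted (K.filter (fun t => t.1 == h)) (fun t => t.2.1)).map
          (fun t => t.2.2) := by
    intro h out
    rw [PySem.List.foldl_append_singleton_eq_map, hgetD h, pv_sorted_snd, List.map_map]
    rfl
  have houter : ∀ (hl : List String) (out : List String),
      hl.foldl (fun out h =>
        (PySem.List.sorted (D.getD h []) (fun t => t.1)).foldl (fun out t => out ++ [t.2]) out) out
      = out ++ (hl.flatMap (fun h =>
          PySem.List.sorted (K.filter (fun t => t.1 == h)) (fun t => t.2.1))).map
          (fun t => t.2.2) := by
    intro hl
    induction hl with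
    | nil => intro out; simp
    | cons h hl ihh =>
      intro out
      rw [List.foldl_cons, hinner h out, ihh, List.flatMap_cons, List.map_append,
        List.append_assoc]
  rw [houter, List.nil_append, hkeys, pv_group, hKraw]
  simp only [PySem.List.sorted2, Bool.false_eq_true, if_false]
  have hmap := pv_foldl_insertBy_map pvG
      (fun a b => decide (PySem.Str.lower (String.ofList a.1) < PySem.Str.lower (String.ofList b.1)) ||
        (!decide (PySem.Str.lower (String.ofList b.1) < PySem.Str.lower (String.ofList a.1)) &&
          decide ((PySem.Int.ofChars? a.2.1).getD 0 < (PySem.Int.ofChars? b.2.1).getD 0)))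
      pvLex (fun a b => rfl) raw []
  simp only [List.map_nil] at hmap
  rw [hmap, List.map_map]
  exact List.map_congr_left fun x _ => (pv_join3 x.1 x.2.1 x.2.2).trans rfl
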